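-- pv_equiv track=rewrite | github.com/n-e-sherman/qctools | qctools/circuits/all_to_all_permuted_one_qubit_echo_mosaic.py | get_prior_patches
-- ===== SOURCE A (Python) =====
-- def get_prior_patches(patches, wires):
--     """
--     Computes the prior patch for each qubit in every patch.
--
--     Parameters:
--         patches: Dictionary {patch_id: [(q0, q1, time), ...]} describing each patch.
--         wires: 2D matrix of shape (N, T) where wires[q, t] contains the patch_id at time t.
--
--     Returns:
--         Dictionary mapping patch_id to another dictionary {qubit: prior_patch_id or None}.
--     """
--     prior_patches = {}
--
--     for patch_id, gates in patches.items():
--         prior_patch_info = {}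
--
--         for q0, q1, time in gates:
--             # Initialize prior patches for q0 and q1 as None
--             prior_patch_q0, prior_patch_q1 = None, None
--
--             # Search backward in time to find the most recent patch acting on q0 and q1
--             for t in range(time - 1, -1, -1):  # Iterate backward in time
--                 if prior_patch_q0 is None and wires[q0, t] != patch_id:
--                     prior_patch_q0 = wires[q0, t]
--                 if prior_patch_q1 is None and wires[q1, t] != patch_id:
--                     prior_patch_q1 = wires[q1, t]
--                 if prior_patch_q0 is not None and prior_patch_q1 is not None:
--                     break
--
--             # Store the prior patches for this patch
--             prior_patch_info[q0] = prior_patch_q0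
--             prior_patch_info[q1] = prior_patch_q1
--         prior_patches[patch_id] = prior_patch_info
--     return prior_patches
-- ===== SOURCE B (Python) =====
-- def _prior(cols, q, patch_id, time):
--     if time <= 0:
--         return None
--     vals, br = cols[q]
--     v = vals[time - 1]
--     return v if v != patch_id else br[time - 1]
--
--
-- def get_prior_patches(patches, wires):
--     # Gather every qubit mentioned by a gate, and the global time horizon.
--     qs = []
--     for gates in patches.values():
--         for q0, q1, time in gates:
--             qs.append(q0)
--             qs.append(q1)
--     maxT = 0
--     for gates in patches.values():
--         for _q0, _q1, time in gates:
--             maxT = max(maxT, time)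
--     # For each qubit: its column of wire values, and per position t the value
--     # just before the constant run containing t (the most recent differing value).
--     cols = {}
--     for q in qs:
--         if q not in cols:
--             vals = [wires[q, t] for t in range(maxT)]
--             br = []
--             prev = None
--             last = None
--             for v in vals:
--                 if last is not None and v != last:
--                     prev = last
--                 br.append(prev)
--                 last = v
--             cols[q] = (vals, br)
--     out = {}
--     for patch_id, gates in patches.items():
--         info = {}
--         for q0, q1, time in gates:
--             info[q0] = _prior(cols, q0, patch_id, time)
--             info[q1] = _prior(cols, q1, patch_id, time)
--         out[patch_id] = info
--     return out
-- ===== Notes on version B (the rewrite author's own statement) =====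
-- stated objective: alternative
-- what changed: Instead of scanning backward in time for every gate, B precomputes once per qubit the wire column together with, for each time, the value before the constant run containing it, and answers each gate by two direct lookups.
-- outside the precondition, e.g. on get_prior_patches({5: [(0, 0, 2)]}, {(0, 1): 3}): A returns {5: {0: 3}}, B raises KeyError
import Mathlib
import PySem

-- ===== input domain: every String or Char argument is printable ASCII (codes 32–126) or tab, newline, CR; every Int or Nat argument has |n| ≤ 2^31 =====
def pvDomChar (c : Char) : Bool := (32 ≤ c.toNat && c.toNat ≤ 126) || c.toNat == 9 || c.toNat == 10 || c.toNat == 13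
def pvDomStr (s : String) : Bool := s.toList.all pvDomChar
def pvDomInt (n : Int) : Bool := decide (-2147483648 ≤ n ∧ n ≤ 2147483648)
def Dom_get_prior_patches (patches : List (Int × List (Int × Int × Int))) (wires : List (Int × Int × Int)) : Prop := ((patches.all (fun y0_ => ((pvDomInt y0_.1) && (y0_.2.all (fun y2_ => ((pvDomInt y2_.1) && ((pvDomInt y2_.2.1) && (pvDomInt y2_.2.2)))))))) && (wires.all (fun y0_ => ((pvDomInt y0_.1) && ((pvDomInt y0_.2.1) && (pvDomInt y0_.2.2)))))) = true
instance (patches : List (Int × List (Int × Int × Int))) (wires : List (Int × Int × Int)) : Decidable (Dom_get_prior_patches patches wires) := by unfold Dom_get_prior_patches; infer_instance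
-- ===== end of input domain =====

-- B precomputes, once per qubit, the wire column and the value preceding each constant run,
-- then answers every gate by direct lookups instead of A's per-gate backward time scan.

-- ===== PORT A =====
-- wires is a Python dict keyed by the pair (q, t), flattened here to triples (q, t, v);
-- lookup is first match on the key pair (exact: a Python dict has unique keys).
def wlookup (wires : List (Int × Int × Int)) (q t : Int) : Option Int :=
  (wires.find? (fun e => e.1 == q && e.2.1 == t)).map (·.2.2)

-- total form of the lookup; the default 0 is only reachable where Python A raises KeyError
-- (those inputs are excluded by Pre_).
def wget (wires : List (Int × Int × Int)) (q t : Int) : Int :=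
  (wlookup wires q t).getD 0

-- A's inner backward loop over t = time-1 … 0, with the early break.
def aScan (wires : List (Int × Int × Int)) (pid q0 q1 : Int) :
    List Int → Option Int × Option Int → Option Int × Option Int
  | [], st => st
  | t :: ts, (p0, p1) =>
    let v0 := wget wires q0 t
    let p0' := if p0 = none ∧ v0 ≠ pid then some v0 else p0
    let v1 := wget wires q1 t
    let p1' := if p1 = none ∧ v1 ≠ pid then some v1 else p1
    if p0' ≠ none ∧ p1' ≠ none then (p0', p1')
    else aScan wires pid q0 q1 ts (p0', p1')

def get_prior_patches (patches : List (Int × List (Int × Int × Int))) (wires : List (Int × Int × Int)) : List (Int × List (Int × Option Int)) :=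
  (patches.foldl (fun (acc : PySem.Dict Int (List (Int × Option Int))) pg =>
    acc.insert pg.1 ((pg.2.foldl (fun (info : PySem.Dict Int (Option Int)) g =>
      let r := aScan wires pg.1 g.1 g.2.1 (PySem.List.pyRange (g.2.2 - 1) (-1) (-1)) (none, none)
      (info.insert g.1 r.1).insert g.2.1 r.2) PySem.Dict.empty).items))
    PySem.Dict.empty).items

-- ===== PORT B =====
-- the forward pass computing br: carried state is (last seen value, value before current run)
def mkBr (last prev : Option Int) : List Int → List (Option Int)
  | [] => []
  | v :: vs =>
    let prev' := match last with
      | some lv => if v ≠ lv then some lv else prev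
      | none => prev
    prev' :: mkBr (some v) prev' vs

def bBuild (wires : List (Int × Int × Int)) (maxT : Int) (q : Int) :
    List Int × List (Option Int) :=
  let vals := (PySem.List.pyRange 0 maxT 1).map (fun t => wget wires q t)
  (vals, mkBr none none vals)

def bAnswer (cols : PySem.Dict Int (List Int × List (Option Int))) (q pid time : Int) : Option Int :=
  if time ≤ 0 then none
  else
    let p := cols.getD q ([], [])
    let v := PySem.List.pyGetD p.1 (time - 1) 0
    if v ≠ pid then some v else PySem.List.pyGetD p.2 (time - 1) none

def get_prior_patches_alt (patches : List (Int × List (Int × Int × Int))) (wires : List (Int × Int × Int)) : List (Int × List (Int × Option Int)) :=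
  let qs := patches.foldl (fun acc pg =>
    pg.2.foldl (fun acc g => (acc ++ [g.1]) ++ [g.2.1]) acc) []
  let maxT := patches.foldl (fun m pg =>
    pg.2.foldl (fun m g => max m g.2.2) m) 0
  let cols := qs.foldl (fun (acc : PySem.Dict Int (List Int × List (Option Int))) q =>
    if acc.contains q then acc else acc.insert q (bBuild wires maxT q)) PySem.Dict.empty
  (patches.foldl (fun (acc : PySem.Dict Int (List (Int × Option Int))) pg =>
    acc.insert pg.1 ((pg.2.foldl (fun (info : PySem.Dict Int (Option Int)) g =>
      (info.insert g.1 (bAnswer cols g.1 pg.1 g.2.2)).insert g.2.1 (bAnswer cols g.2.1 pg.1 g.2.2))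
      PySem.Dict.empty).items))
    PySem.Dict.empty).items

-- ===== PRECONDITION & SPEC =====
-- Pre_ excludes the inputs where the wires dict is missing an entry A (or B) reads, on which
-- Python raises KeyError: it demands wires be defined on every gate-mentioned qubit for all
-- times 0 … maxTime-1 (the dense-matrix domain of A's docstring).  This is slightly stronger
-- than A's exact non-raise set, because A's early break can return before reading a missing
-- entry (see the cite in claim.json).
def Pre_get_prior_patches (patches : List (Int × List (Int × Int × Int))) (wires : List (Int × Int × Int)) : Prop :=
  (patches.all fun pg => pg.2.all fun g =>
    patches.all fun pg' => pg'.2.all fun g' =>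
      (PySem.List.pyRange 0 g'.2.2 1).all fun t =>
        (wlookup wires g.1 t).isSome && (wlookup wires g.2.1 t).isSome) = true
instance (patches : List (Int × List (Int × Int × Int))) (wires : List (Int × Int × Int)) : Decidable (Pre_get_prior_patches patches wires) := by unfold Pre_get_prior_patches; infer_instance

def pvWitness_get_prior_patches : (List (Int × List (Int × Int × Int))) × (List (Int × Int × Int)) :=
  ([(1, [(0, 0, 1)])], [(0, 0, 2)])

def Spec_get_prior_patches (patches : List (Int × List (Int × Int × Int))) (wires : List (Int × Int × Int)) (out : List (Int × List (Int × Option Int))) : Prop := out = get_prior_patches_alt patches wires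
instance (patches : List (Int × List (Int × Int × Int))) (wires : List (Int × Int × Int)) (out : List (Int × List (Int × Option Int))) : Decidable (Spec_get_prior_patches patches wires out) := by unfold Spec_get_prior_patches; infer_instance

-- ===== CLAIM (what is proved, stated in full; the proofs are below) =====
def Claim_equal_get_prior_patches : Prop := ∀ (patches : List (Int × List (Int × Int × Int))) (wires : List (Int × Int × Int)), Dom_get_prior_patches patches wires → Pre_get_prior_patches patches wires → Spec_get_prior_patches patches wires (get_prior_patches patches wires)

-- ===== LEMMAS AND PROOFS =====

-- proof-only helpers: B's three lets as named definitions (alt_unfold bridges by rfl)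
def qsL (patches : List (Int × List (Int × Int × Int))) : List Int :=
  patches.foldl (fun acc pg => pg.2.foldl (fun acc g => (acc ++ [g.1]) ++ [g.2.1]) acc) []

def maxTL (patches : List (Int × List (Int × Int × Int))) : Int :=
  patches.foldl (fun m pg => pg.2.foldl (fun m g => max m g.2.2) m) 0

def colsD (patches : List (Int × List (Int × Int × Int))) (wires : List (Int × Int × Int)) :
    PySem.Dict Int (List Int × List (Option Int)) :=
  (qsL patches).foldl (fun acc q =>
    if acc.contains q then acc else acc.insert q (bBuild wires (maxTL patches) q)) PySem.Dict.empty

theorem alt_unfold (patches : List (Int × List (Int × Int × Int))) (wires : List (Int × Int × Int)) :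
    get_prior_patches_alt patches wires =
    (patches.foldl (fun (acc : PySem.Dict Int (List (Int × Option Int))) pg =>
      acc.insert pg.1 ((pg.2.foldl (fun (info : PySem.Dict Int (Option Int)) g =>
        (info.insert g.1 (bAnswer (colsD patches wires) g.1 pg.1 g.2.2)).insert g.2.1
          (bAnswer (colsD patches wires) g.2.1 pg.1 g.2.2))
        PySem.Dict.empty).items))
      PySem.Dict.empty).items := rfl

-- A's scan, one qubit at a time
def oneScan (f : Int → Int) (pid : Int) : List Int → Option Int → Option Int
  | [], p => p
  | t :: ts, p => oneScan f pid ts (if p = none ∧ f t ≠ pid then some (f t) else p)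

theorem oneScan_some (f : Int → Int) (pid a : Int) :
    ∀ ts : List Int, oneScan f pid ts (some a) = some a := by
  intro ts; induction ts with
  | nil => rfl
  | cons t ts ih => simp [oneScan, ih]

theorem aScan_split (wires : List (Int × Int × Int)) (pid q0 q1 : Int) :
    ∀ (ts : List Int) (p0 p1 : Option Int),
    aScan wires pid q0 q1 ts (p0, p1) =
      (oneScan (wget wires q0) pid ts p0, oneScan (wget wires q1) pid ts p1) := by
  intro ts; induction ts with
  | nil => intro p0 p1; rfl
  | cons t ts ih =>
    intro p0 p1
    simp only [aScan, oneScan]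
    by_cases hb : (if p0 = none ∧ wget wires q0 t ≠ pid then some (wget wires q0 t) else p0) ≠ none ∧
        (if p1 = none ∧ wget wires q1 t ≠ pid then some (wget wires q1 t) else p1) ≠ none
    · rw [if_pos hb]
      obtain ⟨a0, ha0⟩ := Option.ne_none_iff_exists'.mp hb.1
      obtain ⟨a1, ha1⟩ := Option.ne_none_iff_exists'.mp hb.2
      rw [ha0, ha1, oneScan_some, oneScan_some]
    · rw [if_neg hb]
      exact ih _ _

-- value before the constant run containing position j in the column f 0, f 1, …
def bTop (f : Int → Int) : Nat → Option Int
  | 0 => none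
  | j + 1 => if f ((j : Nat) + 1 : Nat) ≠ f (j : Nat) then some (f (j : Nat)) else bTop f j

theorem oneScan_self (f : Int → Int) :
    ∀ j : Nat, oneScan f (f (j : Nat)) (PySem.List.pyRange ((j : Int) - 1) (-1) (-1)) none = bTop f j := by
  intro j; induction j with
  | zero =>
    rw [show ((0 : Nat) : Int) - 1 = -1 by omega, PySem.List.pyRange_neg_one_eq_nil (by omega)]
    rfl
  | succ j ih =>
    rw [show ((j + 1 : Nat) : Int) - 1 = (j : Int) by push_cast; ring,
        PySem.List.pyRange_neg_one_cons (by exact_mod_cast (by omega : (-1 : Int) < (j : Int)))]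
    simp only [oneScan]
    have hcast : ((j : Int) + 1) = ((j + 1 : Nat) : Int) := by push_cast; ring
    by_cases h : f ((j + 1 : Nat) : Int) = f ((j : Nat) : Int)
    · have h' : f ((j : Int) + 1) = f ((j : Nat) : Int) := by rw [hcast]; exact h
      rw [if_neg (by simp [h'])]
      rw [h, ih]
      simp only [bTop]
      rw [if_neg (by simp [h'])]
    · rw [if_pos ⟨by trivial, fun hc => h hc.symm⟩, oneScan_some]
      simp only [bTop]
      rw [if_pos h]

theorem oneScan_desc (f : Int → Int) (pid : Int) (j : Nat) :
    oneScan f pid (PySem.List.pyRange (j : Int) (-1) (-1)) none =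
      if f (j : Nat) ≠ pid then some (f (j : Nat)) else bTop f j := by
  rw [PySem.List.pyRange_neg_one_cons (by omega : (-1 : Int) < (j : Int))]
  show oneScan _ _ _ (if _ then _ else _) = _
  by_cases h : f (j : Nat) ≠ pid
  · rw [if_pos ⟨rfl, h⟩, oneScan_some, if_pos h]
  · rw [if_neg (by simp [h]), if_neg h]
    have h' : f (j : Nat) = pid := not_not.mp (by simpa using h)
    rw [← h', oneScan_self]

theorem mkBr_getElem?_aux (f : Int → Int) :
    ∀ (len a j : Nat) (last prev : Option Int),
    last = (match a with | 0 => none | a' + 1 => some (f ((a' : Nat) : Int))) →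
    prev = (match a with | 0 => none | a' + 1 => bTop f a') →
    j < len →
    (mkBr last prev ((List.range' a len).map (fun k => f ((k : Nat) : Int))))[j]? =
      some (bTop f (a + j)) := by
  intro len
  induction len with
  | zero => intro a j _ _ _ _ h; omega
  | succ l ih =>
    intro a j last prev hlast hprev h
    subst hlast hprev
    rw [List.range'_succ, List.map_cons]
    simp only [mkBr]
    match a with
    | 0 =>
      show ((none : Option Int) :: mkBr (some (f ((0 : Nat) : Int))) none _)[j]? = _
      match j with
      | 0 => rfl
      | j' + 1 =>
        simp only [List.getElem?_cons_succ]
        have h := ih 1 j' (some (f ((0 : Nat) : Int))) (bTop f 0) rfl rfl (by omega)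
        rw [show bTop f 0 = (none : Option Int) from rfl] at h
        rw [h]
        congr 2
        omega
    | a' + 1 =>
      have hstep : (if f ((a' + 1 : Nat) : Int) ≠ f ((a' : Nat) : Int) then some (f ((a' : Nat) : Int)) else bTop f a')
          = bTop f (a' + 1) := rfl
      show ((if f ((a' + 1 : Nat) : Int) ≠ f ((a' : Nat) : Int) then some (f ((a' : Nat) : Int)) else bTop f a') ::
        mkBr (some (f ((a' + 1 : Nat) : Int)))
          (if f ((a' + 1 : Nat) : Int) ≠ f ((a' : Nat) : Int) then some (f ((a' : Nat) : Int)) else bTop f a') _)[j]? = _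
      rw [hstep]
      match j with
      | 0 => rfl
      | j' + 1 =>
        simp only [List.getElem?_cons_succ]
        have := ih (a' + 2) j' (some (f ((a' + 1 : Nat) : Int))) (bTop f (a' + 1)) rfl rfl (by omega)
        rw [this]
        congr 2
        omega

-- the column built by bBuild, as a range' map
theorem bBuild_vals (wires : List (Int × Int × Int)) (maxT q : Int) :
    (bBuild wires maxT q).1 = (List.range' 0 maxT.toNat).map (fun k => wget wires q ((k : Nat) : Int)) := by
  show (PySem.List.pyRange 0 maxT 1).map (fun t => wget wires q t) = _
  rw [PySem.List.pyRange_one]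
  rw [← List.range_eq_range']
  simp

theorem bBuild_br_getElem? (wires : List (Int × Int × Int)) (maxT q : Int) (j : Nat)
    (hj : j < maxT.toNat) :
    (bBuild wires maxT q).2[j]? = some (bTop (wget wires q) j) := by
  show (mkBr none none ((PySem.List.pyRange 0 maxT 1).map (fun t => wget wires q t)))[j]? = _
  have hv : (PySem.List.pyRange 0 maxT 1).map (fun t => wget wires q t)
      = (List.range' 0 maxT.toNat).map (fun k => wget wires q ((k : Nat) : Int)) := bBuild_vals wires maxT q
  rw [hv]
  have := mkBr_getElem?_aux (wget wires q) maxT.toNat 0 j none none rfl rfl hj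
  simpa using this

-- the cols dict: every inserted entry is canonical, every listed qubit present
theorem colsFold_getD {β : Type} (build : Int → β) (d0 : β) :
    ∀ (qs : List Int) (acc : PySem.Dict Int β),
    (∀ k, acc.contains k = true → acc.getD k d0 = build k) →
    (∀ k, (qs.foldl (fun acc q => if acc.contains q then acc else acc.insert q (build q)) acc).contains k = true →
      (qs.foldl (fun acc q => if acc.contains q then acc else acc.insert q (build q)) acc).getD k d0 = build k) := by
  intro qs
  induction qs with
  | nil => intro acc h; simpa using h
  | cons q qs ih =>
    intro acc h
    simp only [List.foldl_cons]
    apply ih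
    intro k hk
    by_cases hc : acc.contains q = true
    · rw [if_pos hc] at hk ⊢; exact h k hk
    · rw [if_neg hc] at hk ⊢
      rw [PySem.Dict.getD_insert]
      split
      · rename_i hkq; rw [hkq]
      · rename_i hne
        apply h
        rw [PySem.Dict.contains_insert] at hk
        simpa [hne] using hk

theorem colsFold_contains_mono {β : Type} (build : Int → β) :
    ∀ (qs : List Int) (acc : PySem.Dict Int β) (k : Int), acc.contains k = true →
    (qs.foldl (fun acc q => if acc.contains q then acc else acc.insert q (build q)) acc).contains k = true := by
  intro qs
  induction qs with
  | nil => intro acc k h; simpa using h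
  | cons q qs ih =>
    intro acc k h
    simp only [List.foldl_cons]
    apply ih
    split
    · exact h
    · rw [PySem.Dict.contains_insert, h]; simp

theorem colsFold_contains {β : Type} (build : Int → β) :
    ∀ (qs : List Int) (acc : PySem.Dict Int β) (q : Int), q ∈ qs →
    (qs.foldl (fun acc q => if acc.contains q then acc else acc.insert q (build q)) acc).contains q = true := by
  intro qs
  induction qs with
  | nil => intro acc q h; simp at h
  | cons q' qs ih =>
    intro acc q h
    simp only [List.foldl_cons]
    rcases List.mem_cons.mp h with rfl | h
    · apply colsFold_contains_mono
      split
      · assumption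
      · exact PySem.Dict.contains_insert_self _ _ _
    · exact ih _ _ h

theorem colsD_getD (patches : List (Int × List (Int × Int × Int))) (wires : List (Int × Int × Int))
    (q : Int) (hq : q ∈ qsL patches) :
    (colsD patches wires).getD q ([], []) = bBuild wires (maxTL patches) q := by
  apply colsFold_getD (bBuild wires (maxTL patches)) ([], []) (qsL patches) PySem.Dict.empty
  · intro k hk; simp [PySem.Dict.contains_empty] at hk
  · exact colsFold_contains _ _ _ _ hq

-- qubit membership and the time bound
theorem qsL_eq (patches : List (Int × List (Int × Int × Int))) :
    qsL patches = patches.flatMap (fun pg => pg.2.flatMap (fun g => [g.1, g.2.1])) := by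
  show patches.foldl _ [] = _
  rw [PySem.List.foldl_congr_mem' patches _
    (fun acc pg => acc ++ pg.2.flatMap (fun g => [g.1, g.2.1])) []
    (by
      intro pg _ acc
      rw [PySem.List.foldl_congr_mem' pg.2 _ (fun acc g => acc ++ [g.1, g.2.1]) acc
        (by intro g _ acc; simp)]
      rw [PySem.List.foldl_append_eq_flatMap])]
  rw [PySem.List.foldl_append_eq_flatMap]
  simp

theorem mem_qsL (patches : List (Int × List (Int × Int × Int)))
    {pg : Int × List (Int × Int × Int)} {g : Int × Int × Int}
    (hpg : pg ∈ patches) (hg : g ∈ pg.2) : g.1 ∈ qsL patches ∧ g.2.1 ∈ qsL patches := by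
  rw [qsL_eq]
  constructor <;> (simp only [List.mem_flatMap]; exact ⟨pg, hpg, g, hg, by simp⟩)

theorem maxTL_fold_mono (ps : List (Int × List (Int × Int × Int))) :
    ∀ m : Int, m ≤ ps.foldl (fun m pg => pg.2.foldl (fun m g => max m g.2.2) m) m := by
  induction ps with
  | nil => intro m; simp
  | cons p ps ih =>
    intro m
    simp only [List.foldl_cons]
    calc m ≤ p.2.foldl (fun m g => max m g.2.2) m :=
            (PySem.List.le_foldl_max_int p.2 (fun g => g.2.2) m).1
    _ ≤ _ := ih _

theorem gate_le_maxTL (patches : List (Int × List (Int × Int × Int)))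
    {pg : Int × List (Int × Int × Int)} {g : Int × Int × Int}
    (hpg : pg ∈ patches) (hg : g ∈ pg.2) : g.2.2 ≤ maxTL patches := by
  obtain ⟨l1, l2, rfl⟩ := List.append_of_mem hpg
  show g.2.2 ≤ (l1 ++ pg :: l2).foldl _ 0
  rw [List.foldl_append, List.foldl_cons]
  calc g.2.2 ≤ pg.2.foldl (fun m g => max m g.2.2) (l1.foldl (fun m pg => pg.2.foldl (fun m g => max m g.2.2) m) 0) :=
        (PySem.List.le_foldl_max_int pg.2 (fun g => g.2.2) _).2 g hg
  _ ≤ _ := maxTL_fold_mono l2 _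

-- the per-qubit answer equality
theorem answer_eq (patches : List (Int × List (Int × Int × Int))) (wires : List (Int × Int × Int))
    (q pid time : Int) (hq : q ∈ qsL patches) (ht : time ≤ maxTL patches) :
    oneScan (wget wires q) pid (PySem.List.pyRange (time - 1) (-1) (-1)) none =
      bAnswer (colsD patches wires) q pid time := by
  by_cases h0 : time ≤ 0
  · rw [PySem.List.pyRange_neg_one_eq_nil (by omega : time - 1 ≤ -1)]
    rw [bAnswer, if_pos h0]
    rfl
  · replace h0 : 0 < time := by omega
    have hj : time - 1 = (((time - 1).toNat : Nat) : Int) := by omega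
    set j : Nat := (time - 1).toNat with hjdef
    have hjT : j < (maxTL patches).toNat := by omega
    rw [bAnswer, if_neg (by omega)]
    simp only []
    rw [colsD_getD patches wires q hq]
    have h1 : PySem.List.pyGetD (bBuild wires (maxTL patches) q).1 (time - 1) 0 = wget wires q (time - 1) := by
      show PySem.List.pyGetD ((PySem.List.pyRange 0 (maxTL patches) 1).map (fun t => wget wires q t)) (time - 1) 0 = _
      exact PySem.List.pyGetD_map_pyRange_of_nonneg _ _ _ _ (by omega) (by omega)
    have h2 : PySem.List.pyGetD (bBuild wires (maxTL patches) q).2 (time - 1) none = bTop (wget wires q) j := by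
      rw [hj, PySem.List.pyGetD_natCast]
      rw [List.getD_eq_getElem?_getD, bBuild_br_getElem? wires (maxTL patches) q j hjT]
      rfl
    rw [h1, h2]
    rw [hj]
    exact oneScan_desc (wget wires q) pid j

-- ===== VERDICT (by name: the statement is the Claim_ definition above) =====
theorem get_prior_patches_spec : Claim_equal_get_prior_patches := by
  intro patches wires _ _
  show get_prior_patches patches wires = get_prior_patches_alt patches wires
  rw [alt_unfold, get_prior_patches]
  refine congrArg PySem.Dict.items ?_
  apply PySem.List.foldl_congr_mem'
  intro pg hpg acc
  refine congrArg (fun l => acc.insert pg.1 l) (congrArg PySem.Dict.items ?_)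
  apply PySem.List.foldl_congr_mem'
  intro g hg info
  obtain ⟨hq0, hq1⟩ := mem_qsL patches hpg hg
  have ht := gate_le_maxTL patches hpg hg
  simp only [aScan_split]
  rw [answer_eq patches wires g.1 pg.1 g.2.2 hq0 ht,
      answer_eq patches wires g.2.1 pg.1 g.2.2 hq1 ht]
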